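-- pv_equiv track=rewrite | github.com/Serbeto/MSCA | MSCA.py | define_areas
-- ===== SOURCE A (Python) =====
-- def define_areas(matriz_admitancia, transformadores):
--     num_barras = len(matriz_admitancia)
--
--     # Inicializa um vetor para armazenar a área de cada barra (-1 indica que ainda não foi definida)
--     areas = [-1] * num_barras
--     area_atual = 0
--
--     def dfs(barra, area):
--         """Função recursiva para realizar a busca em profundidade (DFS)"""
--         areas[barra] = area  # Marca a barra com a área atual
--         for prox_barra in range(num_barras):
--             # Verifica se existe admitância não nula e não há transformador entre as barras
--             if (matriz_admitancia[barra][prox_barra] != 0 and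
--                     prox_barra != barra and
--                     (barra, prox_barra) not in transformadores and
--                     (prox_barra, barra) not in transformadores and
--                     areas[prox_barra] == -1):  # Só visita se ainda não foi visitada
--                 dfs(prox_barra, area)
--
--     # Faz a busca por todas as barras
--     for barra in range(num_barras):
--         if areas[barra] == -1:  # Se a barra ainda não foi marcada com uma área
--             dfs(barra, area_atual)
--             area_atual += 1  # Incrementa a área para a próxima busca
--
--     return areas
-- ===== SOURCE B (Python) =====
-- def define_areas(matriz_admitancia, transformadores):
--     # Two-stage approach: precompute the admissible adjacency lists once, then grow
--     # each component by level-synchronous frontier sweeps (round-based BFS) instead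
--     # of recursion; labels agree because each phase marks exactly the buses
--     # reachable from its root through yet-unlabelled buses, whatever the order.
--     num_barras = len(matriz_admitancia)
--     vizinhos = [[prox for prox in range(num_barras)
--                  if (matriz_admitancia[barra][prox] != 0 and prox != barra
--                      and (barra, prox) not in transformadores
--                      and (prox, barra) not in transformadores)]
--                 for barra in range(num_barras)]
--     areas = [-1] * num_barras
--     area_atual = 0
--     for raiz in range(num_barras):
--         if areas[raiz] == -1:
--             areas[raiz] = area_atual
--             frontier = [raiz]
--             while frontier:
--                 nxt = []
--                 for barra in frontier:
--                     for prox in vizinhos[barra]: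
--                         if areas[prox] == -1:
--                             areas[prox] = area_atual
--                             nxt.append(prox)
--                 frontier = nxt
--             area_atual += 1
--     return areas
-- ===== Notes on version B (the rewrite author's own statement) =====
-- stated objective: alternative
-- what changed: The recursive DFS with its per-node edge scan is replaced by a two-stage algorithm: the admissible adjacency lists are precomputed once, then each component is grown by level-synchronous frontier sweeps (round-based BFS); labels are identical because each phase marks exactly the set of buses reachable from its root through yet-unlabelled buses, independent of traversal order.
import Mathlib
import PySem

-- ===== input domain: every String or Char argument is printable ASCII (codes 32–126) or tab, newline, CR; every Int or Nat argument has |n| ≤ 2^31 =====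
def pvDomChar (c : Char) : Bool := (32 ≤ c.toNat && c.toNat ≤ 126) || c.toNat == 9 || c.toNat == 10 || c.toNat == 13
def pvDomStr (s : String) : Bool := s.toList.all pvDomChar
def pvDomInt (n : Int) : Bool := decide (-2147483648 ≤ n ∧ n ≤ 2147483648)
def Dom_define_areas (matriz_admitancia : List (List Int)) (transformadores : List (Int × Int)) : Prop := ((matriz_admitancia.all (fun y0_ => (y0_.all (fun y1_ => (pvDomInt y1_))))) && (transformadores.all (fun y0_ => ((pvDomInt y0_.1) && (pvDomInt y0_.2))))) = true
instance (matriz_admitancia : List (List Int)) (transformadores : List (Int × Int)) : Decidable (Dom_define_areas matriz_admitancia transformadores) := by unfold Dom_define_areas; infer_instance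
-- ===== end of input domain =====

-- ===== PORT A =====
-- B replaces A's recursive DFS by a two-stage algorithm (precomputed adjacency lists,
-- then level-synchronous frontier sweeps); labels are proved identical on every
-- square matrix. Neither program mutates its arguments.
-- A's edge test, written verbatim in its inner loop. Indexing uses List.getD: under
-- Pre_define_areas every index is in range, so the default is never read (outside
-- Pre_ the Python raises IndexError).
def pvEdge (m : List (List Int)) (t : List (Int × Int)) (barra prox : Nat) : Bool :=
  ((m.getD barra []).getD prox 0 != 0) && (prox != barra)
    && !(t.contains ((barra : Int), (prox : Int)))
    && !(t.contains ((prox : Int), (barra : Int)))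

-- A's inner `def dfs(barra, area)`; fuel = number of still-unvisited buses bounds the
-- recursion depth (a guard making the same computation total, proved sufficient below).
def pvDfsA (m : List (List Int)) (t : List (Int × Int)) (n : Nat) (a : Int) :
    Nat → Nat → List Int → List Int
  | 0, _, areas => areas
  | fuel + 1, barra, areas =>
    (List.range n).foldl
      (fun ar prox =>
        if pvEdge m t barra prox && (ar.getD prox 0 == -1) then
          pvDfsA m t n a fuel prox ar
        else ar)
      (areas.set barra a)

def define_areas (matriz_admitancia : List (List Int)) (transformadores : List (Int × Int)) : List Int :=
  let num_barras := matriz_admitancia.length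
  ((List.range num_barras).foldl
    (fun (st : List Int × Int) barra =>
      if st.1.getD barra 0 == -1 then
        (pvDfsA matriz_admitancia transformadores num_barras st.2 num_barras barra st.1, st.2 + 1)
      else st)
    (List.replicate num_barras (-1), 0)).1

-- ===== PORT B =====
-- B's precomputed `vizinhos` adjacency lists (the list comprehension).
def pvViz (m : List (List Int)) (t : List (Int × Int)) : List (List Nat) :=
  (List.range m.length).map (fun barra =>
    (List.range m.length).filter (fun prox =>
      ((m.getD barra []).getD prox 0 != 0) && (prox != barra)
        && !(t.contains ((barra : Int), (prox : Int)))
        && !(t.contains ((prox : Int), (barra : Int)))))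

-- B's `while frontier:` loop; one step sweeps the whole frontier, marking and
-- collecting the next frontier (Python appends, here conses — the marked set and
-- hence the areas are order-independent, see the proofs). fuel = unvisited count + 1
-- bounds the number of rounds (each round with a non-empty next frontier marks a bus).
def pvBfs (viz : List (List Nat)) (a : Int) : Nat → List Nat → List Int → List Int
  | 0, _, areas => areas
  | _ + 1, [], areas => areas
  | fuel + 1, f :: fs, areas =>
    let st := (f :: fs).foldl
      (fun (p : List Int × List Nat) barra =>
        (viz.getD barra []).foldl
          (fun (q : List Int × List Nat) prox =>
            if q.1.getD prox 0 == -1 then (q.1.set prox a, prox :: q.2) else q) p)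
      (areas, [])
    pvBfs viz a fuel st.2 st.1

def define_areas_alt (matriz_admitancia : List (List Int)) (transformadores : List (Int × Int)) : List Int :=
  let num_barras := matriz_admitancia.length
  let vizinhos := pvViz matriz_admitancia transformadores
  ((List.range num_barras).foldl
    (fun (st : List Int × Int) raiz =>
      if st.1.getD raiz 0 == -1 then
        (pvBfs vizinhos st.2 (num_barras + 1) [raiz] (st.1.set raiz st.2), st.2 + 1)
      else st)
    (List.replicate num_barras (-1), 0)).1

-- ===== PRECONDITION & SPEC =====
-- Pre_ excludes exactly the ragged matrices on which the Python A raises IndexError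
-- (a row shorter than the number of rows is indexed out of range); A returns on
-- every other input.
def Pre_define_areas (matriz_admitancia : List (List Int)) (transformadores : List (Int × Int)) : Prop :=
  ∀ row ∈ matriz_admitancia, matriz_admitancia.length ≤ row.length

instance (matriz_admitancia : List (List Int)) (transformadores : List (Int × Int)) : Decidable (Pre_define_areas matriz_admitancia transformadores) := by unfold Pre_define_areas; infer_instance

def pvWitness_define_areas : List (List Int) × (List (Int × Int)) := ([[0, 1], [1, 0]], [])

def Spec_define_areas (matriz_admitancia : List (List Int)) (transformadores : List (Int × Int)) (out : List Int) : Prop := out = define_areas_alt matriz_admitancia transformadores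
instance (matriz_admitancia : List (List Int)) (transformadores : List (Int × Int)) (out : List Int) : Decidable (Spec_define_areas matriz_admitancia transformadores out) := by unfold Spec_define_areas; infer_instance

-- ===== CLAIM (what is proved, stated in full; the proofs are below) =====
def Claim_equal_define_areas : Prop := ∀ (matriz_admitancia : List (List Int)) (transformadores : List (Int × Int)), Dom_define_areas matriz_admitancia transformadores → Pre_define_areas matriz_admitancia transformadores → Spec_define_areas matriz_admitancia transformadores (define_areas matriz_admitancia transformadores)

-- ===== LEMMAS AND PROOFS =====

-- number of still-unvisited buses (entries equal to -1)
def pvUnv (s : List Int) : Nat := s.countP (fun x => x == -1)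

-- one admissible step of either search out of the state s: an edge into a bus
-- that is still unvisited in s
def pvRel (m : List (List Int)) (t : List (Int × Int)) (s : List Int) (u v : Nat) : Prop :=
  v < m.length ∧ pvEdge m t u v = true ∧ s.getD v 0 = -1

def pvReach (m : List (List Int)) (t : List (Int × Int)) (s : List Int) (u v : Nat) : Prop :=
  Relation.ReflTransGen (pvRel m t s) u v

-- canonical description of one phase: starting from state s, root barra, label a,
-- the result marks with a exactly the buses reachable from barra through
-- yet-unvisited buses, and leaves everything else unchanged
def pvPhase (m : List (List Int)) (t : List (Int × Int)) (s : List Int) (barra : Nat) (a : Int) (r : List Int) : Prop :=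
  r.length = s.length ∧ ∀ i : Nat,
    ((s.getD i 0 = -1 ∧ pvReach m t (s.set barra a) barra i) → r.getD i 0 = a) ∧
    (¬ (s.getD i 0 = -1 ∧ pvReach m t (s.set barra a) barra i) → r.getD i 0 = s.getD i 0)

theorem pv_getD_set (l : List Int) (i : Nat) (a : Int) (j : Nat) :
    (l.set i a).getD j 0 = if j = i ∧ i < l.length then a else l.getD j 0 := by
  simp [List.getD, List.getElem?_set]
  split_ifs <;> simp_all

theorem pvUnv_set (s : List Int) (b : Nat) (a : Int) (hb : b < s.length) (hsb : s.getD b 0 = -1)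
    (ha : a ≠ -1) : pvUnv (s.set b a) + 1 = pvUnv s := by
  induction s generalizing b with
  | nil => simp at hb
  | cons x xs ih =>
    cases b with
    | zero =>
      have hx : x = -1 := by simpa using hsb
      unfold pvUnv
      simp [hx, ha]
    | succ b =>
      have hb' : b < xs.length := by simpa using hb
      have hsb' : xs.getD b 0 = -1 := by simpa using hsb
      have := ih b hb' hsb'
      unfold pvUnv at *
      simp only [List.set, List.countP_cons]
      omega

theorem pvUnv_le_of_imp : ∀ (xs ys : List Int), xs.length = ys.length →
    (∀ i, xs.getD i 0 = -1 → ys.getD i 0 = -1) → pvUnv xs ≤ pvUnv ys := by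
  intro xs
  induction xs with
  | nil => intro ys _ _; simp [pvUnv]
  | cons x xs ih =>
    intro ys hlen h
    cases ys with
    | nil => simp at hlen
    | cons y ys =>
      have h0 := h 0
      have ht := fun i => h (i + 1)
      simp at h0
      simp at ht
      have hrec := ih ys (by simpa using hlen) ht
      unfold pvUnv at *
      simp only [List.countP_cons, beq_iff_eq]
      by_cases hx : x = -1
      · have hy := h0 hx
        simp [hx, hy]; omega
      · simp [hx]; split_ifs <;> omega

theorem pvUnv_pos (s : List Int) (b : Nat) (hb : b < s.length) (hsb : s.getD b 0 = -1) :
    0 < pvUnv s := by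
  unfold pvUnv
  rw [List.countP_pos_iff]
  refine ⟨s[b], List.getElem_mem hb, ?_⟩
  have := List.getD_eq_getElem s 0 hb
  simp only [beq_iff_eq]
  rw [← this]; exact hsb

-- split a path at the last node violating G: a suffix of the path stays inside G
theorem pv_last_bad {α : Type} {R : α → α → Prop} {G : α → Prop} {j i : α}
    (h : Relation.ReflTransGen R j i) :
    G i → ∃ u, (u = j ∨ ¬ G u) ∧ Relation.ReflTransGen R j u ∧
      Relation.ReflTransGen (fun x y => R x y ∧ G y) u i := by
  induction h with
  | refl => intro _; exact ⟨j, Or.inl rfl, .refl, .refl⟩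
  | @tail b c hjb hbc ih =>
    intro hc
    by_cases hb : G b
    · obtain ⟨u, hu, hju, hp⟩ := ih hb
      exact ⟨u, hu, hju, hp.tail ⟨hbc, hc⟩⟩
    · exact ⟨b, Or.inr hb, hjb, Relation.ReflTransGen.single ⟨hbc, hc⟩⟩

theorem pvReach_unv (m : List (List Int)) (t : List (Int × Int)) {s : List Int} {u v : Nat}
    (h : pvReach m t s u v) (hne : v ≠ u) : s.getD v 0 = -1 ∧ v < m.length := by
  rcases Relation.ReflTransGen.cases_tail h with heq | ⟨c, _, hc⟩
  · exact absurd heq hne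
  · exact ⟨hc.2.2, hc.1⟩

theorem pvPhase_unique {m : List (List Int)} {t : List (Int × Int)} {s : List Int} {barra : Nat}
    {a : Int} {r1 r2 : List Int} (h1 : pvPhase m t s barra a r1) (h2 : pvPhase m t s barra a r2) :
    r1 = r2 := by
  obtain ⟨hl1, hp1⟩ := h1
  obtain ⟨hl2, hp2⟩ := h2
  apply List.ext_getElem (by omega)
  intro i hi1 hi2
  have e1 : r1.getD i 0 = r1[i] := List.getD_eq_getElem r1 0 hi1
  have e2 : r2.getD i 0 = r2[i] := List.getD_eq_getElem r2 0 hi2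
  by_cases hc : (s.getD i 0 = -1 ∧ pvReach m t (s.set barra a) barra i)
  · rw [← e1, ← e2, (hp1 i).1 hc, (hp2 i).1 hc]
  · rw [← e1, ← e2, (hp1 i).2 hc, (hp2 i).2 hc]

-- ---------- A side: the recursive DFS satisfies pvPhase ----------

-- buses marked by A's inner loop after its first k iterations
def pvM (m : List (List Int)) (t : List (Int × Int)) (s0 : List Int) (barra k : Nat) (i : Nat) : Prop :=
  ∃ j, j < k ∧ pvRel m t s0 barra j ∧ pvReach m t s0 j i

def pvInv (m : List (List Int)) (t : List (Int × Int)) (s0 : List Int) (barra k : Nat) (a : Int)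
    (ar : List Int) : Prop :=
  ar.length = s0.length ∧ ∀ i : Nat,
    ((s0.getD i 0 = -1 ∧ pvM m t s0 barra k i) → ar.getD i 0 = a) ∧
    (¬ (s0.getD i 0 = -1 ∧ pvM m t s0 barra k i) → ar.getD i 0 = s0.getD i 0)

theorem pvM_closed {m : List (List Int)} {t : List (Int × Int)} {s0 : List Int} {barra k u i : Nat}
    (hu : pvM m t s0 barra k u) (h : pvReach m t s0 u i) : pvM m t s0 barra k i :=
  let ⟨j, hj, hr, hre⟩ := hu
  ⟨j, hj, hr, hre.trans h⟩

theorem pvM_succ {m : List (List Int)} {t : List (Int × Int)} {s0 : List Int} {barra k i : Nat} :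
    pvM m t s0 barra (k + 1) i ↔
      pvM m t s0 barra k i ∨ (pvRel m t s0 barra k ∧ pvReach m t s0 k i) := by
  constructor
  · rintro ⟨j, hj, hr, hre⟩
    rcases Nat.lt_succ_iff_lt_or_eq.mp hj with h | rfl
    · exact Or.inl ⟨j, h, hr, hre⟩
    · exact Or.inr ⟨hr, hre⟩
  · rintro (⟨j, hj, hr, hre⟩ | ⟨hr, hre⟩)
    · exact ⟨j, Nat.lt_succ_of_lt hj, hr, hre⟩
    · exact ⟨k, Nat.lt_succ_self k, hr, hre⟩

theorem pvFoldA_inv (m : List (List Int)) (t : List (Int × Int)) (a : Int) (ha : a ≠ -1) (fuel : Nat)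
    (IH : ∀ (s : List Int) (b : Nat), s.length = m.length → b < m.length →
      s.getD b 0 = -1 → pvUnv s ≤ fuel → pvPhase m t s b a (pvDfsA m t m.length a fuel b s))
    (s0 : List Int) (barra : Nat) (hlen : s0.length = m.length) (hunv : pvUnv s0 ≤ fuel) :
    ∀ (cnt k : Nat) (ar : List Int), k + cnt ≤ m.length → pvInv m t s0 barra k a ar →
      pvInv m t s0 barra (k + cnt) a
        ((List.range' k cnt).foldl
          (fun ar prox => if pvEdge m t barra prox && (ar.getD prox 0 == -1) then
            pvDfsA m t m.length a fuel prox ar else ar) ar) := by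
  intro cnt
  induction cnt with
  | zero => intro k ar _ hInv; simpa using hInv
  | succ cnt ihc =>
    intro k ar hkc hInv
    rw [List.range'_succ, List.foldl_cons]
    have hk : k < m.length := by omega
    have hcast : k + (cnt + 1) = (k + 1) + cnt := by omega
    rw [hcast]
    refine ihc (k + 1) _ (by omega) ?_
    by_cases hcond : (pvEdge m t barra k && (ar.getD k 0 == -1)) = true
    · rw [if_pos hcond]
      have hedge : pvEdge m t barra k = true := by
        simp [Bool.and_eq_true] at hcond; exact hcond.1
      have hark : ar.getD k 0 = -1 := by
        simp [Bool.and_eq_true, beq_iff_eq] at hcond; exact hcond.2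
      obtain ⟨hal, hinv⟩ := hInv
      have hs0k : s0.getD k 0 = -1 ∧ ¬ pvM m t s0 barra k k := by
        by_cases hMk : s0.getD k 0 = -1 ∧ pvM m t s0 barra k k
        · exfalso
          have := (hinv k).1 hMk
          rw [this] at hark; exact ha hark
        · have heq := (hinv k).2 hMk
          rw [heq] at hark
          exact ⟨hark, fun hM => hMk ⟨hark, hM⟩⟩
      have hrelk : pvRel m t s0 barra k := ⟨hk, hedge, hs0k.1⟩
      have E1 : ∀ v, ar.getD v 0 = -1 ↔ (s0.getD v 0 = -1 ∧ ¬ pvM m t s0 barra k v) := by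
        intro v; constructor
        · intro hv
          by_cases hc : s0.getD v 0 = -1 ∧ pvM m t s0 barra k v
          · exfalso; have := (hinv v).1 hc; rw [this] at hv; exact ha hv
          · have := (hinv v).2 hc; rw [this] at hv
            exact ⟨hv, fun hM => hc ⟨hv, hM⟩⟩
        · rintro ⟨h1, h2⟩
          rw [(hinv v).2 (fun hc => h2 hc.2)]; exact h1
      have himp : ∀ i, ar.getD i 0 = -1 → s0.getD i 0 = -1 := fun i hi => ((E1 i).mp hi).1
      have hUar : pvUnv ar ≤ fuel :=
        le_trans (pvUnv_le_of_imp ar s0 hal himp) hunv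
      have hPh := IH ar k (hal.trans hlen) hk hark hUar
      obtain ⟨hal', hph⟩ := hPh
      have E2 : ∀ x y, pvRel m t (ar.set k a) x y ↔
          (pvRel m t s0 x y ∧ (ar.set k a).getD y 0 = -1) := by
        intro x y; constructor
        · rintro ⟨h1, h2, h3⟩
          have hy : ar.getD y 0 = -1 := by
            rw [pv_getD_set] at h3
            split_ifs at h3 with hcase
            · exact absurd h3 ha
            · exact h3
          refine ⟨⟨h1, h2, himp y hy⟩, ?_⟩
          rw [pv_getD_set]
          split_ifs with hcase
          · exfalso
            rw [pv_getD_set, if_pos hcase] at h3; exact ha h3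
          · exact hy
        · rintro ⟨⟨h1, h2, _⟩, h3⟩; exact ⟨h1, h2, h3⟩
      have key : ∀ i, (ar.getD i 0 = -1 ∧ pvReach m t (ar.set k a) k i) ↔
          (s0.getD i 0 = -1 ∧ ¬ pvM m t s0 barra k i ∧ pvReach m t s0 k i) := by
        intro i; constructor
        · rintro ⟨h1, h2⟩
          have hre : pvReach m t s0 k i :=
            Relation.ReflTransGen.mono (fun x y hxy => ((E2 x y).mp hxy).1) h2
          exact ⟨((E1 i).mp h1).1, ((E1 i).mp h1).2, hre⟩
        · rintro ⟨h1, h2, h3⟩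
          have hari : ar.getD i 0 = -1 := (E1 i).mpr ⟨h1, h2⟩
          refine ⟨hari, ?_⟩
          by_cases hik : i = k
          · subst hik; exact .refl
          · have hGi : (ar.set k a).getD i 0 = -1 := by
              rw [pv_getD_set, if_neg (fun hc => hik hc.1)]; exact hari
            obtain ⟨u, hu, hku, hpath⟩ := pv_last_bad (G := fun v => (ar.set k a).getD v 0 = -1) h3 hGi
            have hpath' : pvReach m t (ar.set k a) u i :=
              Relation.ReflTransGen.mono (fun x y hxy => (E2 x y).mpr ⟨hxy.1, hxy.2⟩) hpath
            rcases hu with rfl | hGu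
            · exact hpath'
            · by_cases huk : u = k
              · subst huk; exact hpath'
              · exfalso
                have hs0u := pvReach_unv m t hku huk
                have haru : ¬ (ar.getD u 0 = -1) := by
                  intro hh; apply hGu
                  rw [pv_getD_set, if_neg (fun hc => huk hc.1)]; exact hh
                have hMu : pvM m t s0 barra k u := by
                  by_contra hM
                  exact haru ((E1 u).mpr ⟨hs0u.1, hM⟩)
                exact h2 (pvM_closed hMu
                  (Relation.ReflTransGen.mono (fun x y hxy => hxy.1) hpath))
      refine ⟨hal'.trans hal, ?_⟩
      intro i
      have hM1 : pvM m t s0 barra (k + 1) i ↔ pvM m t s0 barra k i ∨ pvReach m t s0 k i := by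
        rw [pvM_succ]
        constructor
        · rintro (h | ⟨_, h⟩); exacts [Or.inl h, Or.inr h]
        · rintro (h | h); exacts [Or.inl h, Or.inr ⟨hrelk, h⟩]
      constructor
      · rintro ⟨hs, hM⟩
        by_cases hMk : pvM m t s0 barra k i
        · have hai : ar.getD i 0 = a := (hinv i).1 ⟨hs, hMk⟩
          have h2' : (pvDfsA m t m.length a fuel k ar).getD i 0 = ar.getD i 0 :=
            (hph i).2 (by rintro ⟨hc, _⟩; rw [hai] at hc; exact ha hc)
          rw [h2', hai]
        · have hrk : pvReach m t s0 k i := by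
            rcases hM1.mp hM with h | h
            · exact absurd h hMk
            · exact h
          exact (hph i).1 ((key i).mpr ⟨hs, hMk, hrk⟩)
      · intro hnc
        have h2' : (pvDfsA m t m.length a fuel k ar).getD i 0 = ar.getD i 0 :=
          (hph i).2 (by
            rintro ⟨hh1, hh2⟩
            have hkk := (key i).mp ⟨hh1, hh2⟩
            exact hnc ⟨hkk.1, hM1.mpr (Or.inr hkk.2.2)⟩)
        rw [h2', (hinv i).2 (fun hc => hnc ⟨hc.1, hM1.mpr (Or.inl hc.2)⟩)]
    · rw [if_neg hcond]
      obtain ⟨hal, hinv⟩ := hInv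
      refine ⟨hal, fun i => ?_⟩
      have hM1 : (s0.getD i 0 = -1 ∧ pvM m t s0 barra (k + 1) i) ↔
          (s0.getD i 0 = -1 ∧ pvM m t s0 barra k i) := by
        constructor
        · rintro ⟨hs, hM⟩
          rcases pvM_succ.mp hM with h | ⟨hrel, hre⟩
          · exact ⟨hs, h⟩
          · have hark : ¬ (ar.getD k 0 = -1) := by
              intro hh; apply hcond
              simp [Bool.and_eq_true, beq_iff_eq]
              exact ⟨hrel.2.1, hh⟩
            have hMkk : pvM m t s0 barra k k := by
              by_contra hM'
              exact hark (by rw [(hinv k).2 (fun hc => hM' hc.2)]; exact hrel.2.2)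
            exact ⟨hs, pvM_closed hMkk hre⟩
        · rintro ⟨hs, hM⟩; exact ⟨hs, pvM_succ.mpr (Or.inl hM)⟩
      exact ⟨fun hc => (hinv i).1 (hM1.mp hc), fun hc => (hinv i).2 (fun hck => hc (hM1.mpr hck))⟩

theorem pvDfsA_spec (m : List (List Int)) (t : List (Int × Int)) (a : Int) (ha : a ≠ -1) :
    ∀ (fuel : Nat) (s : List Int) (barra : Nat),
      s.length = m.length → barra < m.length → s.getD barra 0 = -1 → pvUnv s ≤ fuel →
      pvPhase m t s barra a (pvDfsA m t m.length a fuel barra s) := by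
  intro fuel
  induction fuel with
  | zero =>
    intro s barra hlen hb hsb hu
    exact absurd hu (by have := pvUnv_pos s barra (by omega) hsb; omega)
  | succ fuel ih =>
    intro s barra hlen hb hsb hu
    have hdef : pvDfsA m t m.length a (fuel + 1) barra s
        = (List.range' 0 m.length).foldl
          (fun ar prox => if pvEdge m t barra prox && (ar.getD prox 0 == -1) then
            pvDfsA m t m.length a fuel prox ar else ar) (s.set barra a) := by
      rw [pvDfsA, List.range_eq_range']
    rw [hdef]
    have hlen0 : (s.set barra a).length = m.length := by rw [List.length_set, hlen]
    have hunv0 : pvUnv (s.set barra a) ≤ fuel := by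
      have := pvUnv_set s barra a (by omega) hsb ha; omega
    have hInv0 : pvInv m t (s.set barra a) barra 0 a (s.set barra a) :=
      ⟨rfl, fun i => ⟨fun ⟨_, j, hj, _⟩ => absurd hj (Nat.not_lt_zero j), fun _ => rfl⟩⟩
    have hfold := pvFoldA_inv m t a ha fuel ih (s.set barra a) barra hlen0 hunv0 m.length 0
      (s.set barra a) (by omega) hInv0
    rw [Nat.zero_add] at hfold
    obtain ⟨halF, hinvF⟩ := hfold
    refine ⟨by rw [halF, List.length_set], ?_⟩
    intro i
    by_cases hib : i = barra
    · subst hib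
      have hs0b : (s.set i a).getD i 0 = a := by
        rw [pv_getD_set, if_pos ⟨rfl, by omega⟩]
      exact ⟨fun _ => by
          rw [(hinvF i).2 (by rintro ⟨hc, _⟩; rw [hs0b] at hc; exact ha hc), hs0b],
        fun hnc => absurd ⟨hsb, Relation.ReflTransGen.refl⟩ hnc⟩
    · have hs0i : (s.set barra a).getD i 0 = s.getD i 0 := by
        rw [pv_getD_set, if_neg (fun hc => hib hc.1)]
      have hcond : ((s.set barra a).getD i 0 = -1 ∧ pvM m t (s.set barra a) barra m.length i) ↔
          (s.getD i 0 = -1 ∧ pvReach m t (s.set barra a) barra i) := by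
        rw [hs0i]
        constructor
        · rintro ⟨hs', j, hj, hrel, hre⟩
          exact ⟨hs', Relation.ReflTransGen.head hrel hre⟩
        · rintro ⟨hs', hre⟩
          rcases Relation.ReflTransGen.cases_head hre with heq | ⟨c, hrel, hre'⟩
          · exact absurd heq.symm hib
          · exact ⟨hs', c, hrel.1, hrel, hre'⟩
      exact ⟨fun hc => (hinvF i).1 (hcond.mpr hc),
        fun hc => by rw [(hinvF i).2 (fun hk => hc (hcond.mp hk)), hs0i]⟩

-- ---------- B side: the frontier-sweep search satisfies pvPhase ----------

theorem pvViz_getD_big (m : List (List Int)) (t : List (Int × Int)) (b : Nat)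
    (hb : m.length ≤ b) : (pvViz m t).getD b [] = [] := by
  apply List.getD_eq_default
  simpa [pvViz] using hb

theorem pvEdge_lt (m : List (List Int)) (t : List (Int × Int)) {b i : Nat}
    (h : pvEdge m t b i = true) : b < m.length := by
  by_contra hb
  have hnone : m[b]? = none := List.getElem?_eq_none (by omega)
  simp [pvEdge, List.getD, hnone] at h

theorem pvViz_mem (m : List (List Int)) (t : List (Int × Int)) (b i : Nat) :
    i ∈ (pvViz m t).getD b [] ↔ (i < m.length ∧ pvEdge m t b i = true) := by
  by_cases hb : b < m.length
  · have : (pvViz m t).getD b [] = (List.range m.length).filter (fun prox =>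
        ((m.getD b []).getD prox 0 != 0) && (prox != b)
          && !(t.contains ((b : Int), (prox : Int)))
          && !(t.contains ((prox : Int), (b : Int)))) := by
      unfold pvViz
      rw [List.getD_eq_getElem _ _ (by simpa using hb)]
      simp
    rw [this, List.mem_filter, List.mem_range]
    exact Iff.rfl
  · rw [pvViz_getD_big m t b (by omega)]
    simp only [List.not_mem_nil, false_iff]
    rintro ⟨_, he⟩
    exact hb (pvEdge_lt m t he)

theorem pvRel_viz (m : List (List Int)) (t : List (Int × Int)) (s : List Int) (u v : Nat) :
    pvRel m t s u v ↔ (v ∈ (pvViz m t).getD u [] ∧ s.getD v 0 = -1) := by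
  rw [pvViz_mem]
  exact ⟨fun ⟨h1, h2, h3⟩ => ⟨⟨h1, h2⟩, h3⟩, fun ⟨⟨h1, h2⟩, h3⟩ => ⟨h1, h2, h3⟩⟩

-- the inner fold of one frontier element (over its neighbour list)
def pvInner (a : Int) (nbrs : List Nat) (p : List Int × List Nat) : List Int × List Nat :=
  nbrs.foldl
    (fun (q : List Int × List Nat) prox =>
      if q.1.getD prox 0 == -1 then (q.1.set prox a, prox :: q.2) else q) p

theorem pvInner_char (a : Int) (ha : a ≠ -1) :
    ∀ (nbrs : List Nat) (ar : List Int) (acc : List Nat),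
      (∀ p ∈ nbrs, p < ar.length) →
      (pvInner a nbrs (ar, acc)).1.length = ar.length ∧
      (∀ i : Nat,
        (i ∈ nbrs ∧ ar.getD i 0 = -1 → (pvInner a nbrs (ar, acc)).1.getD i 0 = a) ∧
        (¬ (i ∈ nbrs ∧ ar.getD i 0 = -1) → (pvInner a nbrs (ar, acc)).1.getD i 0 = ar.getD i 0)) ∧
      (∀ j : Nat, j ∈ (pvInner a nbrs (ar, acc)).2 ↔
        (j ∈ acc ∨ (j ∈ nbrs ∧ ar.getD j 0 = -1))) ∧
      pvUnv (pvInner a nbrs (ar, acc)).1 + (pvInner a nbrs (ar, acc)).2.length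
        = pvUnv ar + acc.length := by
  intro nbrs
  induction nbrs with
  | nil =>
    intro ar acc _
    refine ⟨rfl, fun i => ⟨fun h => absurd h.1 List.not_mem_nil, fun _ => rfl⟩,
      fun j => ?_, rfl⟩
    simp [pvInner]
  | cons p ps ih =>
    intro ar acc hlt
    have hp : p < ar.length := hlt p List.mem_cons_self
    by_cases hap : ar.getD p 0 = -1
    · have hap' : ar[p]?.getD 0 = -1 := by simpa [List.getD] using hap
      have hstep : pvInner a (p :: ps) (ar, acc) = pvInner a ps (ar.set p a, p :: acc) := by
        simp only [pvInner, List.foldl_cons, List.getD]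
        rw [if_pos (by simpa using hap')]
      obtain ⟨ih1, ih2, ih3, ih4⟩ := ih (ar.set p a) (p :: acc)
        (fun q hq => by rw [List.length_set]; exact hlt q (List.mem_cons_of_mem _ hq))
      rw [hstep]
      have hset : ∀ i : Nat, (ar.set p a).getD i 0 = if i = p then a else ar.getD i 0 := by
        intro i
        rw [pv_getD_set]
        by_cases hip : i = p
        · rw [if_pos ⟨hip, hp⟩, if_pos hip]
        · rw [if_neg (fun hc => hip hc.1), if_neg hip]
      refine ⟨ih1.trans (List.length_set ..), ?_, ?_, ?_⟩
      · intro i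
        by_cases hip : i = p
        · subst hip
          constructor
          · intro _
            rw [(ih2 i).2 (by rw [hset i, if_pos rfl]; rintro ⟨_, hc⟩; exact ha hc),
              hset i, if_pos rfl]
          · intro hn; exact absurd ⟨List.mem_cons_self, hap⟩ hn
        · have hW : (i ∈ ps ∧ (ar.set p a).getD i 0 = -1) ↔ (i ∈ p :: ps ∧ ar.getD i 0 = -1) := by
            rw [hset i, if_neg hip, List.mem_cons]
            constructor
            · rintro ⟨h1, h2⟩; exact ⟨Or.inr h1, h2⟩
            · rintro ⟨h1, h2⟩
              rcases h1 with h1 | h1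
              · exact absurd h1 hip
              · exact ⟨h1, h2⟩
          constructor
          · intro hc; exact (ih2 i).1 (hW.mpr hc)
          · intro hc
            rw [(ih2 i).2 (fun hc' => hc (hW.mp hc')), hset i, if_neg hip]
      · intro j
        rw [ih3 j, List.mem_cons, List.mem_cons]
        by_cases hjp : j = p
        · subst hjp
          constructor
          · intro _; exact Or.inr ⟨Or.inl rfl, hap⟩
          · intro _; exact Or.inl (Or.inl rfl)
        · rw [hset j, if_neg hjp]
          constructor
          · rintro ((rfl | hj) | ⟨hj, hj2⟩)
            · exact absurd rfl hjp
            · exact Or.inl hj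
            · exact Or.inr ⟨Or.inr hj, hj2⟩
          · rintro (hj | ⟨hj, hj2⟩)
            · exact Or.inl (Or.inr hj)
            · rcases hj with rfl | hj
              · exact absurd rfl hjp
              · exact Or.inr ⟨hj, hj2⟩
      · have := pvUnv_set ar p a hp hap ha
        simp only [List.length_cons] at ih4 ⊢
        omega
    · have hap' : ¬ ar[p]?.getD 0 = -1 := by simpa [List.getD] using hap
      have hstep : pvInner a (p :: ps) (ar, acc) = pvInner a ps (ar, acc) := by
        simp only [pvInner, List.foldl_cons, List.getD]
        rw [if_neg (by simpa using hap')]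
      obtain ⟨ih1, ih2, ih3, ih4⟩ := ih ar acc (fun q hq => hlt q (List.mem_cons_of_mem _ hq))
      rw [hstep]
      have hW : ∀ i : Nat, (i ∈ p :: ps ∧ ar.getD i 0 = -1) ↔ (i ∈ ps ∧ ar.getD i 0 = -1) := by
        intro i
        rw [List.mem_cons]
        constructor
        · rintro ⟨h1 | h1, h2⟩
          · subst h1; exact absurd h2 hap
          · exact ⟨h1, h2⟩
        · rintro ⟨h1, h2⟩; exact ⟨Or.inr h1, h2⟩
      refine ⟨ih1, fun i => ⟨fun hc => (ih2 i).1 ((hW i).mp hc),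
        fun hc => (ih2 i).2 (fun hc' => hc ((hW i).mpr hc'))⟩, fun j => ?_, ih4⟩
      rw [ih3 j, hW j]

-- one whole-frontier sweep (the body of B's while-loop)
def pvStep (viz : List (List Nat)) (a : Int) (frontier : List Nat) (ar : List Int)
    (acc : List Nat) : List Int × List Nat :=
  frontier.foldl
    (fun (p : List Int × List Nat) barra =>
      (viz.getD barra []).foldl
        (fun (q : List Int × List Nat) prox =>
          if q.1.getD prox 0 == -1 then (q.1.set prox a, prox :: q.2) else q) p)
    (ar, acc)

theorem pvStep_char (viz : List (List Nat)) (a : Int) (ha : a ≠ -1) :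
    ∀ (frontier : List Nat) (ar : List Int) (acc : List Nat),
      (∀ b p, p ∈ viz.getD b [] → p < ar.length) →
      (pvStep viz a frontier ar acc).1.length = ar.length ∧
      (∀ i : Nat,
        ((∃ b ∈ frontier, i ∈ viz.getD b []) ∧ ar.getD i 0 = -1 →
          (pvStep viz a frontier ar acc).1.getD i 0 = a) ∧
        (¬ ((∃ b ∈ frontier, i ∈ viz.getD b []) ∧ ar.getD i 0 = -1) →
          (pvStep viz a frontier ar acc).1.getD i 0 = ar.getD i 0)) ∧
      (∀ j : Nat, j ∈ (pvStep viz a frontier ar acc).2 ↔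
        (j ∈ acc ∨ ((∃ b ∈ frontier, j ∈ viz.getD b []) ∧ ar.getD j 0 = -1))) ∧
      pvUnv (pvStep viz a frontier ar acc).1 + (pvStep viz a frontier ar acc).2.length
        = pvUnv ar + acc.length := by
  intro frontier
  induction frontier with
  | nil =>
    intro ar acc _
    refine ⟨rfl, fun i => ⟨fun h => ?_, fun _ => rfl⟩, fun j => ?_, rfl⟩
    · obtain ⟨⟨b, hb, _⟩, _⟩ := h; exact absurd hb List.not_mem_nil
    · simp [pvStep]
  | cons b F ihF =>
    intro ar acc hviz
    have hstep : pvStep viz a (b :: F) ar acc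
        = pvStep viz a F (pvInner a (viz.getD b []) (ar, acc)).1
            (pvInner a (viz.getD b []) (ar, acc)).2 := by
      simp [pvStep, pvInner]
    obtain ⟨in1, in2, in3, in4⟩ := pvInner_char a ha (viz.getD b []) ar acc (hviz b)
    obtain ⟨f1, f2, f3, f4⟩ := ihF (pvInner a (viz.getD b []) (ar, acc)).1
      (pvInner a (viz.getD b []) (ar, acc)).2
      (fun b' p hp => by rw [in1]; exact hviz b' p hp)
    rw [hstep]
    have har1 : ∀ i : Nat, (pvInner a (viz.getD b []) (ar, acc)).1.getD i 0 = -1 ↔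
        (ar.getD i 0 = -1 ∧ ¬ (i ∈ viz.getD b [])) := by
      intro i
      by_cases hc : i ∈ viz.getD b [] ∧ ar.getD i 0 = -1
      · rw [(in2 i).1 hc]
        constructor
        · intro h; exact absurd h ha
        · rintro ⟨_, h⟩; exact absurd hc.1 h
      · rw [(in2 i).2 hc]
        constructor
        · intro h; exact ⟨h, fun hm => hc ⟨hm, h⟩⟩
        · rintro ⟨h, _⟩; exact h
    have hCond : ∀ i : Nat,
        ((∃ b' ∈ F, i ∈ viz.getD b' []) ∧ (pvInner a (viz.getD b []) (ar, acc)).1.getD i 0 = -1)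
        ↔ ((∃ b' ∈ F, i ∈ viz.getD b' []) ∧ ar.getD i 0 = -1 ∧ ¬ (i ∈ viz.getD b [])) := by
      intro i
      rw [har1 i]
    refine ⟨f1.trans in1, ?_, ?_, ?_⟩
    · intro i
      constructor
      · rintro ⟨⟨b', hb', hm⟩, hi⟩
        rcases List.mem_cons.mp hb' with heq | hbF
        · have hi1 : (pvInner a (viz.getD b []) (ar, acc)).1.getD i 0 = a :=
            (in2 i).1 ⟨heq ▸ hm, hi⟩
          rw [(f2 i).2 (by rintro ⟨_, hc⟩; rw [hi1] at hc; exact ha hc), hi1]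
        · by_cases hmb : i ∈ viz.getD b []
          · have hi1 : (pvInner a (viz.getD b []) (ar, acc)).1.getD i 0 = a :=
              (in2 i).1 ⟨hmb, hi⟩
            rw [(f2 i).2 (by rintro ⟨_, hc⟩; rw [hi1] at hc; exact ha hc), hi1]
          · have hi1 : (pvInner a (viz.getD b []) (ar, acc)).1.getD i 0 = -1 :=
              (har1 i).mpr ⟨hi, hmb⟩
            exact (f2 i).1 ⟨⟨b', hbF, hm⟩, hi1⟩
      · intro hnc
        have hnb : ¬ (i ∈ viz.getD b [] ∧ ar.getD i 0 = -1) := by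
          rintro ⟨h1, h2⟩
          exact hnc ⟨⟨b, List.mem_cons_self, h1⟩, h2⟩
        have hi1 : (pvInner a (viz.getD b []) (ar, acc)).1.getD i 0 = ar.getD i 0 :=
          (in2 i).2 hnb
        have hnf : ¬ ((∃ b' ∈ F, i ∈ viz.getD b' []) ∧
            (pvInner a (viz.getD b []) (ar, acc)).1.getD i 0 = -1) := by
          rintro ⟨⟨b', hb', hm⟩, hc⟩
          rw [hi1] at hc
          exact hnc ⟨⟨b', List.mem_cons_of_mem _ hb', hm⟩, hc⟩
        rw [(f2 i).2 hnf, hi1]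
    · intro j
      rw [f3 j, in3 j, hCond j]
      constructor
      · rintro ((hj | ⟨h1, h2⟩) | ⟨h1, h2, _⟩)
        · exact Or.inl hj
        · exact Or.inr ⟨⟨b, List.mem_cons_self, h1⟩, h2⟩
        · obtain ⟨b', hb', hm⟩ := h1
          exact Or.inr ⟨⟨b', List.mem_cons_of_mem _ hb', hm⟩, h2⟩
      · rintro (hj | ⟨⟨b', hb', hm⟩, h2⟩)
        · exact Or.inl (Or.inl hj)
        · rcases List.mem_cons.mp hb' with rfl | hbF
          · exact Or.inl (Or.inr ⟨hm, h2⟩)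
          · by_cases hmb : j ∈ viz.getD b []
            · exact Or.inl (Or.inr ⟨hmb, h2⟩)
            · exact Or.inr ⟨⟨b', hbF, hm⟩, h2, hmb⟩
    · omega

theorem pvBfs_nil (viz : List (List Nat)) (a : Int) (fuel : Nat) (ar : List Int) :
    pvBfs viz a fuel [] ar = ar := by
  cases fuel <;> rfl

-- what one call of pvBfs achieves, in terms of reachability from the frontier
def pvBSpec (m : List (List Int)) (t : List (Int × Int)) (a : Int) (frontier : List Nat)
    (ar r : List Int) : Prop :=
  r.length = ar.length ∧ ∀ i : Nat,
    ((ar.getD i 0 = -1 ∧ ∃ j ∈ frontier, pvReach m t ar j i) → r.getD i 0 = a) ∧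
    (¬ (ar.getD i 0 = -1 ∧ ∃ j ∈ frontier, pvReach m t ar j i) → r.getD i 0 = ar.getD i 0)

theorem pvBfs_spec (m : List (List Int)) (t : List (Int × Int)) (a : Int) (ha : a ≠ -1) :
    ∀ (fuel : Nat) (frontier : List Nat) (ar : List Int), ar.length = m.length →
      (∀ j ∈ frontier, ar.getD j 0 ≠ -1) → pvUnv ar + 1 ≤ fuel →
      pvBSpec m t a frontier ar (pvBfs (pvViz m t) a fuel frontier ar) := by
  intro fuel
  induction fuel with
  | zero => intro frontier ar _ _ hfuel; omega
  | succ fuel ih =>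
    intro frontier ar hlen hmark hfuel
    cases frontier with
    | nil =>
      exact ⟨rfl, fun i => ⟨fun ⟨_, j, hj, _⟩ => absurd hj List.not_mem_nil, fun _ => rfl⟩⟩
    | cons f fs =>
      have hloop : pvBfs (pvViz m t) a (fuel + 1) (f :: fs) ar
          = pvBfs (pvViz m t) a fuel (pvStep (pvViz m t) a (f :: fs) ar []).2
              (pvStep (pvViz m t) a (f :: fs) ar []).1 := by
        rw [pvBfs]
        rfl
      have hviz : ∀ b p, p ∈ (pvViz m t).getD b [] → p < ar.length := by
        intro b p hp
        rw [hlen]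
        exact ((pvViz_mem m t b p).mp hp).1
      obtain ⟨c1, c2, c3, c4⟩ := pvStep_char (pvViz m t) a ha (f :: fs) ar [] hviz
      set F := f :: fs with hF
      set ar' := (pvStep (pvViz m t) a F ar []).1 with har'
      set F' := (pvStep (pvViz m t) a F ar []).2 with hF'
      have E1 : ∀ i : Nat, ar'.getD i 0 = -1 ↔
          (ar.getD i 0 = -1 ∧ ¬ (∃ b ∈ F, i ∈ (pvViz m t).getD b [])) := by
        intro i
        by_cases hc : (∃ b ∈ F, i ∈ (pvViz m t).getD b []) ∧ ar.getD i 0 = -1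
        · rw [(c2 i).1 hc]
          constructor
          · intro h; exact absurd h ha
          · rintro ⟨_, h⟩; exact absurd hc.1 h
        · rw [(c2 i).2 hc]
          constructor
          · intro h; exact ⟨h, fun hm => hc ⟨hm, h⟩⟩
          · rintro ⟨h, _⟩; exact h
      have hmemF' : ∀ j : Nat, j ∈ F' ↔
          ((∃ b ∈ F, j ∈ (pvViz m t).getD b []) ∧ ar.getD j 0 = -1) := by
        intro j
        rw [hF', c3 j]
        simp
      rw [hloop]
      -- a pvRel step in ar' is a pvRel step in ar into a bus still unvisited in ar'
      have E2 : ∀ x y, pvRel m t ar' x y ↔ (pvRel m t ar x y ∧ ar'.getD y 0 = -1) := by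
        intro x y
        constructor
        · rintro ⟨h1, h2, h3⟩
          exact ⟨⟨h1, h2, ((E1 y).mp h3).1⟩, h3⟩
        · rintro ⟨⟨h1, h2, _⟩, h3⟩; exact ⟨h1, h2, h3⟩
      by_cases hF'e : F' = []
      · -- nothing newly marked: the frontier reaches no unvisited bus, result is ar
        have hnone : ∀ i : Nat, ¬ ((∃ b ∈ F, i ∈ (pvViz m t).getD b []) ∧ ar.getD i 0 = -1) := by
          intro i hc
          have := (hmemF' i).mpr hc
          rw [hF'e] at this
          exact absurd this List.not_mem_nil
        have hsame : ∀ i : Nat, ar'.getD i 0 = ar.getD i 0 := fun i => (c2 i).2 (hnone i)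
        rw [hF'e, pvBfs_nil]
        refine ⟨c1, fun i => ⟨?_, fun _ => hsame i⟩⟩
        rintro ⟨hi, j, hj, hre⟩
        exfalso
        rcases Relation.ReflTransGen.cases_head hre with heq | ⟨v, hrel, _⟩
        · exact hmark i (heq ▸ hj) hi
        · have hv := (pvRel_viz m t ar j v).mp hrel
          exact hnone v ⟨⟨j, hj, hv.1⟩, hv.2⟩
      · have hmark' : ∀ j ∈ F', ar'.getD j 0 ≠ -1 := by
          intro j hj
          have := (hmemF' j).mp hj
          rw [(c2 j).1 ⟨this.1, this.2⟩]
          exact ha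
        have hfuel' : pvUnv ar' + 1 ≤ fuel := by
          have hpos : 0 < F'.length := List.length_pos_iff.mpr hF'e
          have : pvUnv ar' + F'.length = pvUnv ar := by
            have := c4; simpa using this
          omega
        obtain ⟨hslen, hs⟩ := ih F' ar' (c1.trans hlen) hmark' hfuel'
        -- key: for unvisited-in-ar' buses, reachability from F' in ar' = from F in ar
        have key : ∀ i : Nat, ar'.getD i 0 = -1 →
            ((∃ j ∈ F', pvReach m t ar' j i) ↔ (∃ j ∈ F, pvReach m t ar j i)) := by
          intro i hi'
          constructor
          · rintro ⟨j, hj, hre⟩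
            have hre' : pvReach m t ar j i :=
              Relation.ReflTransGen.mono (fun x y hxy => ((E2 x y).mp hxy).1) hre
            obtain ⟨⟨b, hb, hm⟩, hj2⟩ := (hmemF' j).mp hj
            exact ⟨b, hb, Relation.ReflTransGen.head ((pvRel_viz m t ar b j).mpr ⟨hm, hj2⟩) hre'⟩
          · rintro ⟨j, hj, hre⟩
            obtain ⟨u, hu, hju, hpath⟩ :=
              pv_last_bad (G := fun v => ar'.getD v 0 = -1) hre hi'
            have hpath' : pvReach m t ar' u i :=
              Relation.ReflTransGen.mono (fun x y hxy => (E2 x y).mpr ⟨hxy.1, hxy.2⟩) hpath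
            have hfirst : u = j → ∃ j' ∈ F', pvReach m t ar' j' i := by
              -- from a frontier bus: its first step lands in F'
              rintro rfl
              rcases Relation.ReflTransGen.cases_head hpath' with heq | ⟨v, hrel, hre2⟩
              · subst heq
                exact absurd (((E1 u).mp hi').1) (hmark u hj)
              · obtain ⟨hrv, hv'⟩ := (E2 u v).mp hrel
                have hv := (pvRel_viz m t ar u v).mp hrv
                exact ⟨v, (hmemF' v).mpr ⟨⟨u, hj, hv.1⟩, hv.2⟩, hre2⟩
            rcases hu with rfl | hGu
            · exact hfirst rfl
            · by_cases huj : u = j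
              · exact hfirst huj
              · have hau := pvReach_unv m t hju huj
                have hex : ∃ b ∈ F, u ∈ (pvViz m t).getD b [] := by
                  by_contra hne
                  exact hGu ((E1 u).mpr ⟨hau.1, hne⟩)
                exact ⟨u, (hmemF' u).mpr ⟨hex, hau.1⟩, hpath'⟩
        refine ⟨hslen.trans c1, fun i => ⟨?_, ?_⟩⟩
        · rintro ⟨hi, hex⟩
          by_cases hi' : ar'.getD i 0 = -1
          · exact (hs i).1 ⟨hi', (key i hi').mpr hex⟩
          · have hci : (∃ b ∈ F, i ∈ (pvViz m t).getD b []) ∧ ar.getD i 0 = -1 := by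
              by_contra hc
              exact hi' (by rw [(c2 i).2 hc]; exact hi)
            have hia : ar'.getD i 0 = a := (c2 i).1 hci
            rw [(hs i).2 (by rintro ⟨hc, _⟩; rw [hia] at hc; exact ha hc), hia]
        · intro hnc
          by_cases hi : ar.getD i 0 = -1
          · have hnex : ¬ ∃ j ∈ F, pvReach m t ar j i := fun hex => hnc ⟨hi, hex⟩
            have hnb : ¬ (∃ b ∈ F, i ∈ (pvViz m t).getD b []) := by
              rintro ⟨b, hb, hm⟩
              exact hnex ⟨b, hb,
                Relation.ReflTransGen.single ((pvRel_viz m t ar b i).mpr ⟨hm, hi⟩)⟩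
            have hi' : ar'.getD i 0 = -1 := (E1 i).mpr ⟨hi, hnb⟩
            rw [(hs i).2 (by rintro ⟨_, hex⟩; exact hnex ((key i hi').mp hex)),
              (c2 i).2 (by rintro ⟨hb, _⟩; exact hnb hb)]
          · have hi1 : ar'.getD i 0 = ar.getD i 0 := (c2 i).2 (by rintro ⟨_, hc⟩; exact hi hc)
            rw [(hs i).2 (by rintro ⟨hc, _⟩; rw [hi1] at hc; exact hi hc), hi1]

theorem pvPhaseB (m : List (List Int)) (t : List (Int × Int)) (a : Int) (ha : a ≠ -1)
    (s : List Int) (raiz : Nat) (hlen : s.length = m.length) (hr : raiz < m.length)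
    (hs : s.getD raiz 0 = -1) :
    pvPhase m t s raiz a
      (pvBfs (pvViz m t) a (m.length + 1) [raiz] (s.set raiz a)) := by
  have hlen0 : (s.set raiz a).length = m.length := by rw [List.length_set, hlen]
  have hs0r : (s.set raiz a).getD raiz 0 = a := by
    rw [pv_getD_set, if_pos ⟨rfl, by omega⟩]
  obtain ⟨hl, hp⟩ := pvBfs_spec m t a ha (m.length + 1) [raiz] (s.set raiz a) hlen0
    (by
      intro j hj
      have : j = raiz := by simpa using hj
      subst this
      rw [hs0r]; exact ha)
    (by
      have h1 : pvUnv (s.set raiz a) ≤ (s.set raiz a).length := List.countP_le_length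
      omega)
  refine ⟨by rw [hl, List.length_set], ?_⟩
  intro i
  have hex : (∃ j ∈ [raiz], pvReach m t (s.set raiz a) j i) ↔
      pvReach m t (s.set raiz a) raiz i := by
    simp
  by_cases hir : i = raiz
  · subst hir
    have hv : (pvBfs (pvViz m t) a (m.length + 1) [i] (s.set i a)).getD i 0 = a := by
      rw [(hp i).2 (by rintro ⟨hc, _⟩; rw [hs0r] at hc; exact ha hc), hs0r]
    exact ⟨fun _ => hv, fun hnc => absurd ⟨hs, Relation.ReflTransGen.refl⟩ hnc⟩
  · have hsi : (s.set raiz a).getD i 0 = s.getD i 0 := by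
      rw [pv_getD_set, if_neg (fun hc => hir hc.1)]
    constructor
    · rintro ⟨h1, h2⟩
      exact (hp i).1 ⟨by rw [hsi]; exact h1, hex.mpr h2⟩
    · intro hnc
      rw [(hp i).2 (by rintro ⟨hc1, hc2⟩; exact hnc ⟨by rw [← hsi]; exact hc1, hex.mp hc2⟩), hsi]

-- ---------- outer loop and the final equality ----------

theorem pvOuter (m : List (List Int)) (t : List (Int × Int)) :
    ∀ (l : List Nat) (s : List Int) (c : Int),
      (∀ b ∈ l, b < m.length) → s.length = m.length → 0 ≤ c →
      l.foldl (fun (st : List Int × Int) barra =>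
        if st.1.getD barra 0 == -1 then
          (pvDfsA m t m.length st.2 m.length barra st.1, st.2 + 1)
        else st) (s, c)
      = l.foldl (fun (st : List Int × Int) raiz =>
        if st.1.getD raiz 0 == -1 then
          (pvBfs (pvViz m t) st.2 (m.length + 1) [raiz] (st.1.set raiz st.2), st.2 + 1)
        else st) (s, c) := by
  intro l
  induction l with
  | nil => intros; rfl
  | cons b l ihl =>
    intro s c hmem hlen hc
    simp only [List.foldl_cons]
    by_cases hcond : (s.getD b 0 == -1) = true
    · rw [if_pos hcond, if_pos hcond]
      have hsb : s.getD b 0 = -1 := by simpa [beq_iff_eq] using hcond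
      have hb : b < m.length := hmem b List.mem_cons_self
      have hane : c ≠ -1 := by omega
      have hA := pvDfsA_spec m t c hane m.length s b hlen hb hsb
        (le_trans List.countP_le_length (le_of_eq hlen))
      have hB := pvPhaseB m t c hane s b hlen hb hsb
      have heq := pvPhase_unique hA hB
      rw [heq]
      exact ihl _ _ (fun x hx => hmem x (List.mem_cons_of_mem _ hx))
        (by rw [hB.1, hlen]) (by omega)
    · rw [if_neg hcond, if_neg hcond]
      exact ihl s c (fun x hx => hmem x (List.mem_cons_of_mem _ hx)) hlen hc

theorem pv_main (m : List (List Int)) (t : List (Int × Int)) :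
    define_areas m t = define_areas_alt m t :=
  congrArg Prod.fst (pvOuter m t (List.range m.length) (List.replicate m.length (-1)) 0
    (fun b hb => List.mem_range.mp hb) (by simp) (le_refl 0))

-- ===== VERDICT (by name: the statement is the Claim_ definition above) =====
theorem define_areas_spec : Claim_equal_define_areas := by
  intro m t _ _
  unfold Spec_define_areas
  exact pv_main m t
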